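-- pv_equiv track=rewrite | github.com/golubitsky/leetcode | src/algorithms/miscellaneous.py | max_after_all_operations
-- ===== SOURCE A (Python) =====
-- def max_after_all_operations(n, operations):
--     """
--     https://wcipeg.com/wiki/Prefix_sum_array_and_difference_array
--     Inputs:
--     n -- int: size of array
--     operations -- array of arrays of a, b, k:
--         For every operation:
--             increment all elements in array between,
--                 * a and b inclusive
--                 * index starting at 1
--
--     At the end of this operation = [1, 2, 100], n = 5 we would have
--     array = [100, 100, 0, 0, 0]
--
--     Output:
--     int max(array)
--     """
--     arr = (n + 1) * [0]
--     for a, b, k in operations: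
--         arr[a - 1] += k
--         arr[b] -= k
--
--     max = 0
--     tmp = 0
--     for diff in arr:
--         tmp += diff
--         if tmp > max:
--             max = tmp
--
--     return max
-- ===== SOURCE B (Python) =====
-- def max_after_all_operations(n, operations):
--     # Event sweep: sort the 2*m difference events by position and scan them with a
--     # running sum, checking the maximum at each group of coincident positions;
--     # no (n+1)-sized array is allocated.
--     events = []
--     for a, b, k in operations:
--         events.append((a - 1, k))
--         events.append((b, -k))
--     events.sort(key=lambda e: e[0])
--     best = 0
--     run = 0
--     m = len(events)
--     for i in range(m):
--         run += events[i][1]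
--         if (i == m - 1 or events[i + 1][0] != events[i][0]) and run > best:
--             best = run
--     return best
-- ===== Notes on version B (the rewrite author's own statement) =====
-- stated objective: idiomatic
-- what changed: Instead of allocating an (n+1)-element difference array, updating it per operation and scanning all n+1 prefix sums, B builds a list of 2*m (position, delta) events, sorts it by position, and sweeps it once with a running sum, comparing against the maximum only at the last event of each coincident-position group.
-- outside the precondition, e.g. on max_after_all_operations(2, [[0, 1, 5]]): A returns 0, B returns 5
import Mathlib
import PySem

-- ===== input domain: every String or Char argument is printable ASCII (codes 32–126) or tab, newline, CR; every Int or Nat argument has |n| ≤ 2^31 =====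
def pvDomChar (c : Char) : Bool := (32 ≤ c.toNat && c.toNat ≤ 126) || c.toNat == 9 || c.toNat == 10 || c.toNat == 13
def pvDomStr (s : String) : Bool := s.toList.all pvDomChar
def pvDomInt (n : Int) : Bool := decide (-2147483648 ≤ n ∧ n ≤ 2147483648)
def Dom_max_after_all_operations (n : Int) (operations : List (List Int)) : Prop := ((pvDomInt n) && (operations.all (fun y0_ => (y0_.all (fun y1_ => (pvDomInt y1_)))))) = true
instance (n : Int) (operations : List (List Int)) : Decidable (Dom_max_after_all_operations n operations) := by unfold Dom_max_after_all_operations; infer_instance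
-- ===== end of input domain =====

-- B replaces A's (n+1)-sized difference array and full prefix-sum scan by a sorted
-- event sweep over the 2*m (position, delta) events (idiomatic event-sweep; no size-n array).


-- ===== PORT A =====
-- one operation row of A's first loop: arr[a-1] += k; arr[b] -= k  (a row that is not
-- [a, b, k], or an out-of-range index, raises in Python; such inputs are outside Pre_)
def pvApplyOp (arr : List Int) (op : List Int) : List Int :=
  match op with
  | [a, b, k] =>
      let arr1 := PySem.List.pySetD arr (a - 1) (PySem.List.pyGetD arr (a - 1) 0 + k)
      PySem.List.pySetD arr1 b (PySem.List.pyGetD arr1 b 0 - k)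
  | _ => arr

def max_after_all_operations (n : Int) (operations : List (List Int)) : Int :=
  let arr := operations.foldl pvApplyOp (List.replicate (n + 1).toNat 0)
  let r := arr.foldl (fun (s : Int × Int) diff =>
      let tmp := s.2 + diff
      (if tmp > s.1 then tmp else s.1, tmp)) (0, 0)
  r.1

-- ===== PORT B =====
-- the sweep loop of Source B: run += events[i][1]; compare against the max only when the next
-- event has a different position (or there is no next event)
def pvSweep : List (Int × Int) → Int → Int → Int
  | [], best, _ => best
  | [e], best, run =>
      let run' := run + e.2
      if run' > best then run' else best
  | e :: e' :: rest, best, run =>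
      let run' := run + e.2
      let best' := if e'.1 ≠ e.1 ∧ run' > best then run' else best
      pvSweep (e' :: rest) best' run'

def max_after_all_operations_alt (n : Int) (operations : List (List Int)) : Int :=
  let events := operations.foldl (fun ev op =>
      match op with
      | [a, b, k] => ev ++ [(a - 1, k), (b, -k)]
      | _ => ev) []
  let events := PySem.List.sorted events (fun e => e.1) false
  pvSweep events 0 0

-- ===== PRECONDITION & SPEC =====
-- Pre_: every row is exactly [a, b, k] with its two difference-array indices in range,
-- 0 ≤ a - 1 ≤ n and 0 ≤ b ≤ n (the docstring's natural domain is the subset 1 ≤ a ≤ b ≤ n).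
-- Outside it A raises (ValueError / IndexError) or, for a ≤ 0 / b < 0, writes through
-- Python's negative-index wraparound — inputs outside the documented domain.
def Pre_max_after_all_operations (n : Int) (operations : List (List Int)) : Prop :=
  ∀ op ∈ operations, op.length = 3 ∧
    1 ≤ op.getD 0 0 ∧ op.getD 0 0 ≤ n + 1 ∧ 0 ≤ op.getD 1 0 ∧ op.getD 1 0 ≤ n
instance (n : Int) (operations : List (List Int)) : Decidable (Pre_max_after_all_operations n operations) := by unfold Pre_max_after_all_operations; infer_instance

def pvWitness_max_after_all_operations : Int × List (List Int) := (3, [[1, 2, 5], [2, 3, 1]])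

def Spec_max_after_all_operations (n : Int) (operations : List (List Int)) (out : Int) : Prop := out = max_after_all_operations_alt n operations
instance (n : Int) (operations : List (List Int)) (out : Int) : Decidable (Spec_max_after_all_operations n operations out) := by unfold Spec_max_after_all_operations; infer_instance

-- ===== CLAIM (what is proved, stated in full; the proofs are below) =====
def Claim_equal_max_after_all_operations : Prop := ∀ (n : Int) (operations : List (List Int)), Dom_max_after_all_operations n operations → Pre_max_after_all_operations n operations → Spec_max_after_all_operations n operations (max_after_all_operations n operations)

-- ===== LEMMAS AND PROOFS =====

def pvPvals (t : Int) : List Int → List Int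
  | [] => []
  | d :: ds => (t + d) :: pvPvals (t + d) ds

def pvMsum (E : List (Int × Int)) (p : Int) : Int :=
  ((E.filter (fun e => decide (e.1 ≤ p))).map Prod.snd).sum

def pvGvals (t : Int) : List (Int × Int) → List Int
  | [] => []
  | [e] => [t + e.2]
  | e :: e' :: rest =>
      if e'.1 = e.1 then pvGvals (t + e.2) (e' :: rest)
      else (t + e.2) :: pvGvals (t + e.2) (e' :: rest)

def pvEvOf (op : List Int) : List (Int × Int) :=
  [(op.getD 0 0 - 1, op.getD 2 0), (op.getD 1 0, -op.getD 2 0)]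

def pvEvList (ops : List (List Int)) : List (Int × Int) := ops.flatMap pvEvOf


theorem pv_if_gt (a b : Int) : (if a > b then a else b) = max b a := by
  rcases le_total a b with h | h
  · rw [max_eq_left h]; split_ifs with h2 <;> omega
  · rw [max_eq_right h]; split_ifs with h2 <;> omega

theorem pv_sweep_eq_foldl_max (S : List (Int × Int)) : ∀ best run,
    pvSweep S best run = (pvGvals run S).foldl max best := by
  induction S with
  | nil => intro best run; simp [pvSweep, pvGvals]
  | cons e S ih =>
    intro best run
    cases S with
    | nil => simp [pvSweep, pvGvals, pv_if_gt]
    | cons e' rest =>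
      show pvSweep (e :: e' :: rest) best run = _
      rw [pvSweep, pvGvals]
      by_cases h : e'.1 = e.1
      · simp only [h, ih]
        congr 1
        simp
      · rw [if_neg h, ih]
        simp only [List.foldl_cons]
        congr 1
        simp only [ne_eq, h, not_false_eq_true, true_and, pv_if_gt]

theorem pv_mem_pvals (xs : List Int) : ∀ t x,
    (x ∈ pvPvals t xs ↔ ∃ j : Nat, j < xs.length ∧ x = t + ((xs.take (j+1)).sum)) := by
  induction xs with
  | nil => intro t x; simp [pvPvals]
  | cons d ds ih =>
    intro t x
    rw [pvPvals]
    simp only [List.mem_cons, ih]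
    constructor
    · rintro (rfl | ⟨j, hj, rfl⟩)
      · exact ⟨0, by simp, by simp⟩
      · exact ⟨j + 1, by simpa using hj, by simp [List.take_succ_cons]; ring⟩
    · rintro ⟨j, hj, rfl⟩
      cases j with
      | zero => left; simp
      | succ j => right; exact ⟨j, by simpa using hj, by simp [List.take_succ_cons]; ring⟩

theorem pv_scan_eq_foldl_max (xs : List Int) : ∀ mx t,
    (xs.foldl (fun (s : Int × Int) diff =>
      let tmp := s.2 + diff
      (if tmp > s.1 then tmp else s.1, tmp)) (mx, t)).1 = (pvPvals t xs).foldl max mx := by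
  induction xs with
  | nil => intro mx t; simp [pvPvals]
  | cons d ds ih =>
    intro mx t
    simp only [List.foldl_cons]
    rw [ih, pvPvals, List.foldl_cons, pv_if_gt]

theorem pv_sum_take_set (xs : List Int) : ∀ (i t : Nat) (k : Int), i < xs.length →
    ((xs.set i (xs.getD i 0 + k)).take t).sum = (xs.take t).sum + (if i < t then k else 0) := by
  induction xs with
  | nil => intro i t k h; simp at h
  | cons d ds ih =>
    intro i t k h
    cases i with
    | zero =>
      cases t with
      | zero => simp
      | succ t => simp [List.take_succ_cons]; ring
    | succ i =>
      cases t with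
      | zero => simp
      | succ t =>
        simp only [List.getD_cons_succ, List.set_cons_succ, List.take_succ_cons, List.sum_cons,
          ih i t k (by simpa using h)]
        have h3 : (if i + 1 < t + 1 then k else (0:Int)) = (if i < t then k else 0) := by simp
        rw [h3]
        ring

theorem pvMsum_nil (p : Int) : pvMsum [] p = 0 := rfl

theorem pvMsum_cons (e : Int × Int) (S : List (Int × Int)) (p : Int) :
    pvMsum (e :: S) p = (if e.1 ≤ p then e.2 else 0) + pvMsum S p := by
  simp only [pvMsum, List.filter_cons]
  by_cases h : e.1 ≤ p
  · simp [h]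
  · simp [h]

theorem pvMsum_append (E1 E2 : List (Int × Int)) (p : Int) :
    pvMsum (E1 ++ E2) p = pvMsum E1 p + pvMsum E2 p := by
  simp [pvMsum, List.filter_append]

theorem pvMsum_eq_zero {S : List (Int × Int)} {p : Int} (h : ∀ e ∈ S, p < e.1) :
    pvMsum S p = 0 := by
  have : S.filter (fun e => decide (e.1 ≤ p)) = [] := by
    rw [List.filter_eq_nil_iff]
    intro e he
    simpa using (by have := h e he; omega : ¬ e.1 ≤ p)
  simp [pvMsum, this]

theorem pv_mem_gvals : ∀ (S : List (Int × Int)), S.Pairwise (fun x y => x.1 ≤ y.1) →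
    ∀ t x, (x ∈ pvGvals t S ↔ ∃ e ∈ S, x = t + pvMsum S e.1) := by
  intro S
  induction S with
  | nil => intro _ t x; simp [pvGvals]
  | cons e S ih =>
    intro hS t x
    have he : ∀ f ∈ S, e.1 ≤ f.1 := fun f hf => List.rel_of_pairwise_cons hS hf
    have hS' : S.Pairwise (fun x y => x.1 ≤ y.1) := hS.of_cons
    cases S with
    | nil => simp [pvGvals, pvMsum_cons, pvMsum_nil]
    | cons e' rest =>
      have he' : ∀ g ∈ rest, e'.1 ≤ g.1 := fun g hg => List.rel_of_pairwise_cons hS' hg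
      by_cases h : e'.1 = e.1
      · rw [pvGvals, if_pos h, ih hS' (t + e.2) x]
        constructor
        · rintro ⟨f, hf, rfl⟩
          refine ⟨f, List.mem_cons_of_mem _ hf, ?_⟩
          rw [pvMsum_cons e (e' :: rest) f.1, if_pos (he f hf)]
          ring
        · rintro ⟨f, hf, rfl⟩
          rcases List.mem_cons.mp hf with rfl | hf'
          · refine ⟨e', List.mem_cons_self .., ?_⟩
            rw [pvMsum_cons f (e' :: rest) f.1, if_pos (le_refl _), h]
            ring
          · refine ⟨f, hf', ?_⟩
            rw [pvMsum_cons e (e' :: rest) f.1, if_pos (he f hf')]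
            ring
      · have hstrict : ∀ f ∈ e' :: rest, e.1 < f.1 := by
          intro f hf
          rcases List.mem_cons.mp hf with rfl | hf'
          · exact lt_of_le_of_ne (he f hf) (fun hc => h hc.symm)
          · exact lt_of_lt_of_le (lt_of_le_of_ne (he e' (List.mem_cons_self ..))
              (fun hc => h hc.symm)) (he' f hf')
        rw [pvGvals, if_neg h]
        rw [List.mem_cons, ih hS' (t + e.2) x]
        constructor
        · rintro (rfl | ⟨f, hf, rfl⟩)
          · refine ⟨e, List.mem_cons_self .., ?_⟩
            rw [pvMsum_cons e (e' :: rest) e.1, if_pos (le_refl _), pvMsum_eq_zero hstrict]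
            ring
          · refine ⟨f, List.mem_cons_of_mem _ hf, ?_⟩
            rw [pvMsum_cons e (e' :: rest) f.1, if_pos (le_of_lt (hstrict f hf))]
            ring
        · rintro ⟨f, hf, rfl⟩
          rcases List.mem_cons.mp hf with rfl | hf'
          · left
            rw [pvMsum_cons f (e' :: rest) f.1, if_pos (le_refl _), pvMsum_eq_zero hstrict]
            ring
          · right
            refine ⟨f, hf', ?_⟩
            rw [pvMsum_cons e (e' :: rest) f.1, if_pos (le_of_lt (hstrict f hf'))]
            ring

theorem pv_length_applyOp (arr : List Int) (op : List Int) :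
    (pvApplyOp arr op).length = arr.length := by
  unfold pvApplyOp
  split
  · simp [PySem.List.length_pySetD]
  · rfl

theorem pv_length_applyOps : ∀ (ops : List (List Int)) (arr : List Int),
    (ops.foldl pvApplyOp arr).length = arr.length := by
  intro ops
  induction ops with
  | nil => intro arr; rfl
  | cons op ops ih => intro arr; rw [List.foldl_cons, ih, pv_length_applyOp]

-- one operation changes the prefix sums by its two events

theorem pv_applyOp_take_sum (n : Int) (op : List Int) (arr : List Int) (t : Nat)
    (hv : op.length = 3 ∧ 1 ≤ op.getD 0 0 ∧ op.getD 0 0 ≤ n + 1 ∧ 0 ≤ op.getD 1 0 ∧ op.getD 1 0 ≤ n)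
    (harr : arr.length = (n + 1).toNat) :
    ((pvApplyOp arr op).take t).sum = (arr.take t).sum + pvMsum (pvEvOf op) ((t : Int) - 1) := by
  obtain ⟨hlen, ha1, ha2, hb1, hb2⟩ := hv
  obtain ⟨a, b, k, rfl⟩ : ∃ a b k, op = [a, b, k] := by
    match op, hlen with
    | [a, b, k], _ => exact ⟨a, b, k, rfl⟩
  simp only [List.getD, List.getElem?_cons_zero, List.getElem?_cons_succ, Option.getD_some] at ha1 ha2 hb1 hb2
  have hn : (0:Int) ≤ n := by omega
  have hL : ((n + 1).toNat : Int) = n + 1 := Int.toNat_of_nonneg (by omega)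
  have hia : ((a - 1).toNat : Int) = a - 1 := Int.toNat_of_nonneg (by omega)
  have hib : (b.toNat : Int) = b := Int.toNat_of_nonneg (by omega)
  have hialt : (a - 1).toNat < arr.length := by omega
  have hiblt : b.toNat < arr.length := by omega
  have e1 : PySem.List.pySetD arr (a - 1) (PySem.List.pyGetD arr (a - 1) 0 + k)
      = arr.set (a - 1).toNat (arr.getD (a - 1).toNat 0 + k) := by
    rw [PySem.List.pySetD_of_nonneg _ _ (by omega),
      PySem.List.pyGetD_eq_getElem _ _ (by omega) (by rw [← harr] at hL; omega),
      List.getD_eq_getElem _ _ hialt]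
  have hlen1 : (arr.set (a - 1).toNat (arr.getD (a - 1).toNat 0 + k)).length = arr.length := by
    simp
  set arr1 := arr.set (a - 1).toNat (arr.getD (a - 1).toNat 0 + k) with harr1
  have e2 : PySem.List.pySetD arr1 b (PySem.List.pyGetD arr1 b 0 - k)
      = arr1.set b.toNat (arr1.getD b.toNat 0 + (-k)) := by
    rw [PySem.List.pySetD_of_nonneg _ _ (by omega),
      PySem.List.pyGetD_eq_getElem _ _ (by omega) (by rw [← harr] at hL; omega)]
    have hg : arr1.getD b.toNat 0 = arr1[b.toNat]'(by omega) := List.getD_eq_getElem _ _ (by omega)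
    rw [hg, sub_eq_add_neg]
  show ((PySem.List.pySetD _ b _).take t).sum = _
  rw [e1] at *
  rw [e2, pv_sum_take_set arr1 b.toNat t (-k) (by omega),
    pv_sum_take_set arr (a - 1).toNat t k hialt]
  have : pvMsum (pvEvOf [a, b, k]) ((t : Int) - 1)
      = (if (a - 1).toNat < t then k else 0) + (if b.toNat < t then -k else 0) := by
    simp only [pvEvOf, List.getD, List.getElem?_cons_zero, List.getElem?_cons_succ,
      Option.getD_some, pvMsum_cons, pvMsum_nil]
    have c1 : (a - 1 ≤ (t:Int) - 1) ↔ ((a-1).toNat < t) := by omega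
    have c2 : (b ≤ (t:Int) - 1) ↔ (b.toNat < t) := by omega
    rw [if_congr c1 rfl rfl, if_congr c2 rfl rfl]
    ring
  rw [this]
  ring

theorem pv_applyOps_take_sum (n : Int) : ∀ (ops : List (List Int)) (arr : List Int) (t : Nat),
    (∀ op ∈ ops, op.length = 3 ∧ 1 ≤ op.getD 0 0 ∧ op.getD 0 0 ≤ n + 1 ∧ 0 ≤ op.getD 1 0 ∧ op.getD 1 0 ≤ n) →
    arr.length = (n + 1).toNat →
    ((ops.foldl pvApplyOp arr).take t).sum
      = (arr.take t).sum + pvMsum (pvEvList ops) ((t : Int) - 1) := by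
  intro ops
  induction ops with
  | nil => intro arr t _ _; simp [pvEvList, pvMsum]
  | cons op ops ih =>
    intro arr t hv harr
    rw [List.foldl_cons,
      ih (pvApplyOp arr op) t (fun o ho => hv o (List.mem_cons_of_mem _ ho))
        (by rw [pv_length_applyOp]; exact harr),
      pv_applyOp_take_sum n op arr t (hv op (List.mem_cons_self ..)) harr]
    have hsplit : pvEvList (op :: ops) = pvEvOf op ++ pvEvList ops := by simp [pvEvList]
    rw [hsplit, pvMsum_append]
    ring

theorem pv_events_eq (ops : List (List Int))
    (hpre : ∀ op ∈ ops, op.length = 3 ∧ True) :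
    ops.foldl (fun ev op =>
      match op with
      | [a, b, k] => ev ++ [(a - 1, k), (b, -k)]
      | _ => ev) ([] : List (Int × Int)) = pvEvList ops := by
  rw [PySem.List.foldl_congr_mem ops _ (fun ev op => ev ++ pvEvOf op) []
    (by
      intro acc op hop
      obtain ⟨a, b, k, rfl⟩ : ∃ a b k, op = [a, b, k] := by
        match op, (hpre op hop).1 with
        | [a, b, k], _ => exact ⟨a, b, k, rfl⟩
      simp [pvEvOf])]
  rw [PySem.List.foldl_append_eq_flatMap]
  rfl

theorem pv_main (n : Int) (ops : List (List Int))
    (hpre : Pre_max_after_all_operations n ops) :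
    max_after_all_operations n ops = max_after_all_operations_alt n ops := by
  unfold max_after_all_operations max_after_all_operations_alt
  simp only []
  rw [pv_scan_eq_foldl_max, pv_sweep_eq_foldl_max,
    pv_events_eq ops (fun op hop => ⟨(hpre op hop).1, trivial⟩)]
  set E := pvEvList ops with hE
  set S := PySem.List.sorted E (fun e => e.1) false with hS
  set arr := ops.foldl pvApplyOp (List.replicate (n + 1).toNat 0) with harrdef
  have hperm : S.Perm E := PySem.List.sorted_perm E (fun e => e.1) false
  have hpair : S.Pairwise (fun x y => x.1 ≤ y.1) := PySem.List.sorted_pairwise E (fun e => e.1)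
  have harrlen : arr.length = (n + 1).toNat := by
    rw [harrdef, pv_length_applyOps]; simp
  have hsum : ∀ t : Nat, (arr.take t).sum = pvMsum E ((t : Int) - 1) := by
    intro t
    rw [harrdef, pv_applyOps_take_sum n ops _ t hpre (by simp)]
    simp [List.take_replicate]
    rw [← hE]
  have hmsumSE : ∀ p, pvMsum S p = pvMsum E p := by
    intro p
    exact List.Perm.sum_eq (List.Perm.map Prod.snd (List.Perm.filter _ hperm))
  have hposE : ∀ e ∈ E, 0 ≤ e.1 ∧ e.1 ≤ n := by
    intro e he
    rcases List.mem_flatMap.mp he with ⟨op, hop, hein⟩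
    obtain ⟨hlen, ha1, ha2, hb1, hb2⟩ := hpre op hop
    obtain ⟨a, b, k, rfl⟩ : ∃ a b k, op = [a, b, k] := by
      match op, hlen with
      | [a, b, k], _ => exact ⟨a, b, k, rfl⟩
    simp only [List.getD, List.getElem?_cons_zero, List.getElem?_cons_succ,
      Option.getD_some] at ha1 ha2 hb1 hb2
    simp only [pvEvOf, List.getD, List.getElem?_cons_zero, List.getElem?_cons_succ,
      Option.getD_some, List.mem_cons, List.not_mem_nil, or_false] at hein
    rcases hein with rfl | rfl <;> simp <;> omega
  apply le_antisymm
  · rcases PySem.List.foldl_max_mem (pvPvals 0 arr) 0 with h0 | hmem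
    · rw [h0]; exact (PySem.List.le_foldl_max _ _).1
    · obtain ⟨j, hj, hx⟩ := (pv_mem_pvals arr 0 _).mp hmem
      have hval : List.foldl max 0 (pvPvals 0 arr) = pvMsum E (j : Int) := by
        rw [hx, hsum (j + 1)]
        have : ((j + 1 : Nat) : Int) - 1 = (j : Int) := by omega
        rw [this]
        omega
      rw [hval]
      rcases hm : PySem.List.max? (E.filter (fun e => decide (e.1 ≤ (j : Int)))) Prod.fst with _ | e0
      · have hfil : E.filter (fun e => decide (e.1 ≤ (j : Int))) = [] :=
          (PySem.List.max?_eq_none_iff _ _).mp hm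
        have hz : pvMsum E (j : Int) = 0 := by simp [pvMsum, hfil]
        rw [hz]
        exact (PySem.List.le_foldl_max _ _).1
      · have he0f := PySem.List.max?_mem hm
        have hmax := PySem.List.max?_isMax hm
        have he0E : e0 ∈ E := (List.mem_filter.mp he0f).1
        have he0j : e0.1 ≤ (j : Int) := by simpa using (List.mem_filter.mp he0f).2
        have hEq : pvMsum E (j : Int) = pvMsum E e0.1 := by
          unfold pvMsum
          rw [List.filter_congr (l := E) (p := fun e => decide (e.1 ≤ (j : Int)))
            (q := fun e => decide (e.1 ≤ e0.1)) ?_]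
          intro x hx
          rw [decide_eq_decide]
          constructor
          · intro hle
            exact hmax x (List.mem_filter.mpr ⟨hx, by simpa using hle⟩)
          · intro hle
            exact le_trans hle he0j
        rw [hEq, ← hmsumSE e0.1]
        have hmem' : (0 : Int) + pvMsum S e0.1 ∈ pvGvals 0 S :=
          (pv_mem_gvals S hpair 0 _).mpr ⟨e0, hperm.mem_iff.mpr he0E, rfl⟩
        have hb := (PySem.List.le_foldl_max (pvGvals 0 S) 0).2 _ hmem'
        omega
  · rcases PySem.List.foldl_max_mem (pvGvals 0 S) 0 with h0 | hmem
    · rw [h0]; exact (PySem.List.le_foldl_max _ _).1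
    · obtain ⟨e, heS, hx⟩ := (pv_mem_gvals S hpair 0 _).mp hmem
      have heE : e ∈ E := hperm.mem_iff.mp heS
      obtain ⟨hge0, hlen'⟩ := hposE e heE
      have hj : e.1.toNat < arr.length := by
        rw [harrlen]; omega
      have hval : List.foldl max 0 (pvGvals 0 S) = 0 + (arr.take (e.1.toNat + 1)).sum := by
        rw [hx, hmsumSE, hsum (e.1.toNat + 1)]
        have : ((e.1.toNat + 1 : Nat) : Int) - 1 = e.1 := by omega
        rw [this]
      rw [hval]
      exact (PySem.List.le_foldl_max _ _).2 _ ((pv_mem_pvals arr 0 _).mpr ⟨e.1.toNat, hj, rfl⟩)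

-- ===== VERDICT (by name: the statement is the Claim_ definition above) =====
theorem max_after_all_operations_spec : Claim_equal_max_after_all_operations := by
  intro n operations _ hpre
  unfold Spec_max_after_all_operations
  exact pv_main n operations hpre
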